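-- pv_equiv track=rewrite | github.com/fuh-Q/gdkore | formatting.py | all_casings
-- ===== SOURCE A (Python) =====
-- from typing import Generator, SupportsInt
--
-- def all_casings(input_string: str) -> Generator[str, None, None]:
--     """
--     A generator that yields every combination of lowercase and uppercase in a given string
--
--     Arguments
--     ---------
--     input_string: `str`
--         The string to iterate through
--
--     Returns
--     -------
--     all_casings: Generator[`str`]
--         A generator object yielding every combination of lowercase and uppercase
--     """
--     if not input_string:
--         yield ""
--     else:
--         first = input_string[:1]
--         if first.lower() == first.upper():
--             for sub_casing in all_casings(input_string[1:]):
--                 yield first + sub_casing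
--         else:
--             for sub_casing in all_casings(input_string[1:]):
--                 yield first.lower() + sub_casing
--                 yield first.upper() + sub_casing
-- ===== SOURCE B (Python) =====
-- from itertools import product
--
-- def all_casings(input_string):
--     options = [(c,) if c.lower() == c.upper() else (c.lower(), c.upper())
--                for c in input_string]
--     for combo in product(*reversed(options)):
--         yield "".join(reversed(combo))
-- ===== Notes on version B (the rewrite author's own statement) =====
-- stated objective: simpler
-- what changed: Replaces A's per-character recursion of generators with one pass building per-character option tuples followed by a single itertools.product traversal (reversed so the leftmost character varies fastest, matching A's order).
import Mathlib
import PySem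

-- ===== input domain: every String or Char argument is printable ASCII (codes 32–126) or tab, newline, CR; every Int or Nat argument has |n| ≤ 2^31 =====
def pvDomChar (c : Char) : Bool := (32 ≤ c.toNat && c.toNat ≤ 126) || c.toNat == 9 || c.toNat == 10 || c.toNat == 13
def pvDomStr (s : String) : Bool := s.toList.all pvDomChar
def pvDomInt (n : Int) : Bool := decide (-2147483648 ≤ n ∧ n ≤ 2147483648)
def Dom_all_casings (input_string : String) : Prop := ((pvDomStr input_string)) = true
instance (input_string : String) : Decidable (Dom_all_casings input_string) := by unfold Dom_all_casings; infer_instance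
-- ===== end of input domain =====

-- B builds per-character option tuples and takes one cartesian-product pass instead of A's recursion of nested generators; return-value equivalence (both Pythons are generators, compared as the list of yielded strings). Char.toLower/toUpper are exact for str.lower/str.upper on the ASCII domain.

-- ===== PORT A =====
-- A's recursion on the string, working over List Char (first = head char).
def allCasingsRecA : List Char → List (List Char)
  | [] => [[]]
  | c :: rest =>
    if c.toLower == c.toUpper then
      (allCasingsRecA rest).map (fun sub => c :: sub)
    else
      (allCasingsRecA rest).flatMap (fun sub => [c.toLower :: sub, c.toUpper :: sub])

def all_casings (input_string : String) : List String :=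
  (allCasingsRecA input_string.toList).map String.mk

-- ===== PORT B =====
-- one option tuple per character: (c,) or (c.lower(), c.upper())
def casingOptions (cs : List Char) : List (List Char) :=
  cs.map (fun c => if c.toLower == c.toUpper then [c] else [c.toLower, c.toUpper])

-- itertools.product over a list of option lists (last list varies fastest)
def pyProduct (opts : List (List Char)) : List (List Char) :=
  opts.foldl (fun acc opt => acc.flatMap (fun t => opt.map (fun c => t ++ [c]))) [[]]

def all_casings_alt (input_string : String) : List String :=
  (pyProduct (casingOptions input_string.toList).reverse).map
    (fun combo => String.mk combo.reverse)

-- ===== PRECONDITION & SPEC =====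
def Spec_all_casings (input_string : String) (out : List String) : Prop := out = all_casings_alt input_string
instance (input_string : String) (out : List String) : Decidable (Spec_all_casings input_string out) := by unfold Spec_all_casings; infer_instance

-- ===== CLAIM (what is proved, stated in full; the proofs are below) =====
def Claim_equal_all_casings : Prop := ∀ (input_string : String), Dom_all_casings input_string → Spec_all_casings input_string (all_casings input_string)

-- ===== LEMMAS AND PROOFS =====

theorem pyProduct_concat (opts : List (List Char)) (o : List Char) :
    pyProduct (opts ++ [o]) =
      (pyProduct opts).flatMap (fun t => o.map (fun c => t ++ [c])) := by
  simp [pyProduct]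

theorem flatMap_one {α β : Type} (f : α → β) (l : List α) :
    l.flatMap (fun x => [f x]) = l.map f := by
  induction l with
  | nil => rfl
  | cons a t ih => simp [List.flatMap_cons, ih]

theorem map_reverse_flatMap (P : List (List Char)) (o : List Char) :
    (P.flatMap (fun t => o.map (fun c => t ++ [c]))).map List.reverse
      = (P.map List.reverse).flatMap (fun s => o.map (fun c => c :: s)) := by
  simp [List.map_flatMap, List.flatMap_map, List.map_map, Function.comp_def, List.reverse_append]

theorem key (cs : List Char) :
    allCasingsRecA cs = (pyProduct (casingOptions cs).reverse).map List.reverse := by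
  induction cs with
  | nil => simp [allCasingsRecA, casingOptions, pyProduct]
  | cons c rest ih =>
    have h : (casingOptions (c :: rest)).reverse =
        (casingOptions rest).reverse ++
          [if c.toLower == c.toUpper then [c] else [c.toLower, c.toUpper]] := by
      simp [casingOptions]
    rw [allCasingsRecA, h, pyProduct_concat, map_reverse_flatMap, ← ih]
    by_cases hc : c.toLower == c.toUpper
    · simp only [hc, if_pos]; exact (flatMap_one _ _).symm
    · simp [hc]

-- ===== VERDICT (by name: the statement is the Claim_ definition above) =====
theorem all_casings_spec : Claim_equal_all_casings := by
  intro s _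
  unfold Spec_all_casings all_casings all_casings_alt
  rw [key, List.map_map]
  rfl
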